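-- pv_equiv track=rewrite | github.com/miliar/Code_Jam_Webscraper | solutions_python/Problem_155/966.py | solve
-- ===== SOURCE A (Python) =====
-- def solve(cipher):
--     inputs = cipher.split(" ")
--     Smax = inputs[0]
--     digits = inputs[1]
--     fcnt = 0
--     acnt = 0
--     #print digits
--     for i in range(len(digits)):
--         digit = int(digits[i])
--         if digit==0:
--             continue
--
--         if (fcnt+acnt)<i:
--             fcnt += (i-(acnt+fcnt))
--         acnt += digit
--
--     return str(fcnt)
-- ===== SOURCE B (Python) =====
-- def solve(cipher):
--     parts = cipher.split(" ")
--     digits = [int(ch) for ch in parts[1]]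
--     prefix = [0]
--     for d in digits:
--         prefix.append(prefix[-1] + d)
--     candidates = [i - p for i, (d, p) in enumerate(zip(digits, prefix)) if d != 0]
--     return str(max(candidates + [0]))
-- ===== Notes on version B (the rewrite author's own statement) =====
-- stated objective: alternative
-- what changed: A greedily simulates the top-up loop carrying two running counters (fcnt, acnt); B first builds the digit-value list and its prefix-sum table, then takes the answer as max of (i - prefix[i]) over nonzero-digit positions together with 0.
import Mathlib
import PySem

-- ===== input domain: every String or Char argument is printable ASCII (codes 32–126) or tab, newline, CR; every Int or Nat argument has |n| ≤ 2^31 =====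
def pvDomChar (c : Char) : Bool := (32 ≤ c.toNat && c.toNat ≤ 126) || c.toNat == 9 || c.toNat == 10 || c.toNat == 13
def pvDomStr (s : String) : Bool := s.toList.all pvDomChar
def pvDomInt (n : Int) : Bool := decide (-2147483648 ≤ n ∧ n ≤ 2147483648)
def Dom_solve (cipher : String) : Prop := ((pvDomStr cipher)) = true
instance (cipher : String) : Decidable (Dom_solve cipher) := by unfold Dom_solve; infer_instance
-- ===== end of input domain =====

-- B replaces A's greedy top-up simulation by a prefix-sum table plus one max over
-- nonzero-digit positions (same cost, different decomposition: objective "alternative").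

-- ===== PORT A =====
-- one iteration of A's loop body: digit = int(digits[i]); skip zeros; top up fcnt;
-- the `none` state marks a ValueError from int()
def pvAstep (st : Option (Int × Int)) (i : Int) (ch : Char) : Option (Int × Int) :=
  match st with
  | none => none
  | some (fcnt, acnt) =>
    match PySem.Int.ofChars? [ch] with
    | none => none
    | some digit =>
      if digit = 0 then some (fcnt, acnt)
      else
        let fcnt' := if fcnt + acnt < i then fcnt + (i - (acnt + fcnt)) else fcnt
        some (fcnt', acnt + digit)

-- literal transliteration of A: split, index 0 and 1, greedy loop over range(len(digits))
-- carrying (fcnt, acnt); "" outputs mark inputs where the Python raises (outside Pre_solve)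
def solve (cipher : String) : String :=
  match PySem.Str.split? cipher " " with
  | none => ""
  | some inputs =>
    match PySem.List.pyGet? inputs 0, PySem.List.pyGet? inputs 1 with
    | some _Smax, some digits =>
      let st := (PySem.List.pyRange 0 (PySem.List.len digits.toList) 1).foldl
        (fun st i => pvAstep st i (PySem.List.pyGetD digits.toList i ' '))
        (some ((0 : Int), (0 : Int)))
      match st with
      | some (fcnt, _) => PySem.Int.toStr fcnt
      | none => ""
    | _, _ => ""

-- ===== PORT B =====
-- literal transliteration of B (Source B): parse all digits first, build the prefix-sum
-- list, collect i - prefix[i] over positions with nonzero digit, answer = max(... + [0])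
def solve_alt (cipher : String) : String :=
  -- split? is `some` whenever the separator is nonempty, so .getD [] is exact here;
  -- Option.elim "" marks the inputs where Source B raises (IndexError / ValueError)
  let parts := (PySem.Str.split? cipher " ").getD []
  (PySem.List.pyGet? parts 1).elim "" fun ds =>
    (ds.toList.mapM (fun ch => PySem.Int.ofChars? [ch])).elim "" fun digits =>
      let pref := digits.foldl
        (fun (pre : List Int) d => pre ++ [PySem.List.pyGetD pre (-1) 0 + d]) [(0 : Int)]
      let candidates := (PySem.List.enumerate (digits.zip pref)).filterMap
        (fun x => if x.2.1 ≠ 0 then some (x.1 - x.2.2) else none)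
      (PySem.List.max? (candidates ++ [0]) id).elim "" PySem.Int.toStr

-- ===== PRECONDITION & SPEC =====
-- Pre_solve = exactly the inputs on which the Python A returns: the split has a second
-- field (else IndexError) and every character of that field is a decimal digit (else
-- ValueError from int()).
def Pre_solve (cipher : String) : Prop :=
  2 ≤ ((PySem.Str.split? cipher " ").getD []).length ∧
    (((PySem.Str.split? cipher " ").getD []).getD 1 "").toList.all PySem.Chars.isdigit = true
instance (cipher : String) : Decidable (Pre_solve cipher) := by unfold Pre_solve; infer_instance
def pvWitness_solve : String := "10 2100"
def Spec_solve (cipher : String) (out : String) : Prop := out = solve_alt cipher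
instance (cipher : String) (out : String) : Decidable (Spec_solve cipher out) := by unfold Spec_solve; infer_instance

-- ===== CLAIM (what is proved, stated in full; the proofs are below) =====
def Claim_equal_solve : Prop := ∀ (cipher : String), Dom_solve cipher → Pre_solve cipher → Spec_solve cipher (solve cipher)

-- ===== LEMMAS AND PROOFS =====

-- recursive description of left-to-right parsing of the characters with int()
def pvParse (cs : List Char) : Option (List Int) :=
  match cs with
  | [] => some []
  | c :: cs =>
    match PySem.Int.ofChars? [c], pvParse cs with
    | some d, some l => some (d :: l)
    | _, _ => none

-- A's loop, on the already-parsed digit values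
def pvAloop (vs : List Int) (s f a : Int) : Int × Int :=
  match vs with
  | [] => (f, a)
  | d :: vs =>
    if d = 0 then pvAloop vs (s + 1) f a
    else pvAloop vs (s + 1) (if f + a < s then f + (s - (a + f)) else f) (a + d)

-- the list of candidate terms s - a over nonzero positions
def pvTerms (vs : List Int) (s a : Int) : List Int :=
  match vs with
  | [] => []
  | d :: vs =>
    if d = 0 then pvTerms vs (s + 1) a
    else (s - a) :: pvTerms vs (s + 1) (a + d)

-- running prefix sums starting after a
def pvScan (a : Int) (vs : List Int) : List Int :=
  match vs with
  | [] => []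
  | d :: vs => (a + d) :: pvScan (a + d) vs

theorem pv_mapM (cs : List Char) :
    cs.mapM (fun ch => PySem.Int.ofChars? [ch]) = pvParse cs := by
  induction cs with
  | nil => simp [pvParse]
  | cons c cs ih =>
    rw [List.mapM_cons, pvParse]
    cases h : PySem.Int.ofChars? [c] with
    | none => simp
    | some d =>
      rw [ih]
      cases pvParse cs <;> simp

theorem pv_astep_foldl_none (l : List (Int × Char)) :
    l.foldl (fun st p => pvAstep st p.1 p.2) none = none := by
  induction l with
  | nil => rfl
  | cons p l ih => simpa [pvAstep] using ih

theorem pv_a_loop (cs : List Char) (s f a : Int) :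
    (PySem.List.enumerate cs s).foldl (fun st p => pvAstep st p.1 p.2) (some (f, a))
      = (pvParse cs).map (fun vs => pvAloop vs s f a) := by
  induction cs generalizing s f a with
  | nil => simp [pvParse, pvAloop, PySem.List.enumerate]
  | cons c cs ih =>
    rw [PySem.List.enumerate_cons, List.foldl_cons]
    show (PySem.List.enumerate cs (s + 1)).foldl (fun st p => pvAstep st p.1 p.2)
        (pvAstep (some (f, a)) s c) = _
    cases h : PySem.Int.ofChars? [c] with
    | none =>
      have hstep : pvAstep (some (f, a)) s c = none := by simp [pvAstep, h]
      rw [hstep, pv_astep_foldl_none]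
      simp [pvParse, h]
    | some d =>
      by_cases hd : d = 0
      · subst hd
        have hstep : pvAstep (some (f, a)) s c = some (f, a) := by simp [pvAstep, h]
        rw [hstep, ih]
        simp only [pvParse, h]
        cases hp : pvParse cs <;> simp [pvAloop]
      · have hstep : pvAstep (some (f, a)) s c
            = some (if f + a < s then f + (s - (a + f)) else f, a + d) := by
          simp [pvAstep, h, hd]
        rw [hstep, ih]
        simp only [pvParse, h]
        cases hp : pvParse cs <;> simp [pvAloop, hd]

theorem pv_aloop_eq_foldl_max (vs : List Int) (s f a : Int) :
    (pvAloop vs s f a).1 = (pvTerms vs s a).foldl max f := by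
  induction vs generalizing s f a with
  | nil => simp [pvAloop, pvTerms]
  | cons d vs ih =>
    by_cases hd : d = 0
    · simp [pvAloop, pvTerms, hd, ih]
    · have hmax : (if f + a < s then f + (s - (a + f)) else f) = max f (s - a) := by
        split_ifs with h <;> omega
      simp [pvAloop, pvTerms, hd, hmax, ih]

theorem pv_prefix_fold (vs : List Int) (pre : List Int) (a : Int) :
    vs.foldl (fun (pre : List Int) d => pre ++ [PySem.List.pyGetD pre (-1) 0 + d]) (pre ++ [a])
      = pre ++ [a] ++ pvScan a vs := by
  induction vs generalizing pre a with
  | nil => simp [pvScan]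
  | cons d vs ih =>
    simp only [List.foldl_cons, PySem.List.pyGetD_neg_one_append_singleton]
    rw [show pre ++ [a] ++ [a + d] = (pre ++ [a]) ++ [a + d] from rfl, ih]
    simp [pvScan]

theorem pv_candidates (vs : List Int) (s a : Int) :
    (PySem.List.enumerate (vs.zip (a :: pvScan a vs)) s).filterMap
        (fun x => if x.2.1 ≠ 0 then some (x.1 - x.2.2) else none)
      = pvTerms vs s a := by
  induction vs generalizing s a with
  | nil => simp [pvScan, pvTerms]
  | cons d vs ih =>
    simp only [pvScan, List.zip_cons_cons, PySem.List.enumerate_cons, List.filterMap_cons]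
    by_cases hd : d = 0
    · subst hd
      have := ih (s + 1) (a + 0)
      rw [add_zero] at this
      simpa [pvTerms] using this
    · simpa [pvTerms, hd] using ih (s + 1) (a + d)

theorem pv_foldl_max_mem (l : List Int) (f : Int) :
    l.foldl max f = f ∨ l.foldl max f ∈ l := by
  induction l generalizing f with
  | nil => simp
  | cons x l ih =>
    simp only [List.foldl_cons]
    rcases ih (max f x) with h | h
    · rcases le_total x f with hle | hle
      · left; rw [h, max_eq_left hle]
      · right; rw [h, max_eq_right hle]; exact List.mem_cons_self
    · right; exact List.mem_cons_of_mem _ h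

theorem pv_max_append_zero (l : List Int) :
    PySem.List.max? (l ++ [0]) id = some (l.foldl max 0) := by
  cases hm : PySem.List.max? (l ++ [0]) id with
  | none =>
    rw [PySem.List.max?_eq_none_iff] at hm
    simp at hm
  | some m =>
    congr 1
    have hmem := PySem.List.max?_mem hm
    have hmax := PySem.List.max?_isMax hm
    have h1 : m ≤ l.foldl max 0 := by
      rcases List.mem_append.1 hmem with h | h
      · exact (PySem.List.le_foldl_max l 0).2 m h
      · simp at h; subst h; exact (PySem.List.le_foldl_max l 0).1
    have h2 : l.foldl max 0 ≤ m := by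
      rcases pv_foldl_max_mem l 0 with h | h
      · rw [h]; exact hmax 0 (by simp)
      · exact hmax _ (by simp [h])
    simp only at h1 h2
    omega

-- the whole-program equality (Pre_ is not needed: where A raises, both ports return "")
theorem pv_main (cipher : String) : solve cipher = solve_alt cipher := by
  unfold solve solve_alt
  cases hs : PySem.Str.split? cipher " " with
  | none => rfl
  | some parts =>
    simp only [Option.getD_some]
    cases h1 : PySem.List.pyGet? parts 1 with
    | none =>
      cases h0 : PySem.List.pyGet? parts 0 <;> rfl
    | some digits =>
      cases h0 : PySem.List.pyGet? parts 0 with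
      | none =>
        exfalso
        rw [PySem.List.pyGet?_eq_none_iff] at h0
        have hmem := PySem.List.mem_of_pyGet?_eq_some parts h1
        have hlen : 1 ≤ parts.length := by
          cases parts with
          | nil => simp at hmem
          | cons _ _ => simp
        exact h0 (by simp [PySem.Raise.InRange]; omega)
      | some Smax =>
        simp only
        rw [show ((PySem.List.pyRange 0 (PySem.List.len digits.toList) 1).foldl
            (fun st i => pvAstep st i (PySem.List.pyGetD digits.toList i ' '))
            (some ((0 : Int), (0 : Int))))
            = (PySem.List.enumerate digits.toList 0).foldl
              (fun st p => pvAstep st p.1 p.2) (some ((0 : Int), (0 : Int))) from by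
          rw [PySem.List.enumerate_eq_map_pyRange digits.toList ' ', List.foldl_map]]
        rw [pv_a_loop]
        simp only [Option.elim_some]
        rw [pv_mapM]
        cases hp : pvParse digits.toList with
        | none => rfl
        | some vs =>
          simp only [Option.map_some, Option.elim_some]
          rw [show ([(0 : Int)] : List Int) = [] ++ [(0 : Int)] from rfl, pv_prefix_fold,
            List.nil_append]
          rw [show ([(0 : Int)] ++ pvScan 0 vs) = (0 : Int) :: pvScan 0 vs from rfl]
          rw [pv_candidates, pv_max_append_zero, pv_aloop_eq_foldl_max]
          rfl

-- ===== VERDICT (by name: the statement is the Claim_ definition above) =====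
theorem solve_spec : Claim_equal_solve := by
  intro cipher _ _
  unfold Spec_solve
  exact pv_main cipher
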